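-- pv_equiv track=rewrite | github.com/ChineseResearcher/l33tc0d3-dump | sorting/Q2943 Maximize Area of Square Hole in Grid.py | maximizeSquareHoleArea
-- ===== SOURCE A (Python) =====
-- from typing import List
--
-- def maximizeSquareHoleArea(n: int, m: int, hBars: List[int], vBars: List[int]) -> int:
--
--     # key ideas:
--     # 1) the biggest squared hole arises from the longest common length
--     # that we could free-up from both vertical and horizontal directions
--
--     # 2) finding that longest common length requires sorting and linear
--     # passes to hBars and vBars to find the longest free section
--
--     fmax = lambda a, b: a if a > b else b
--
--     hBars.sort()
--     # set prev. un-removable to the bar before hBars[0]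
--     prev, h_best = hBars[0]-1, 0
--     for i in range(len(hBars)-1):
--         # non-contiguous detected
--         if hBars[i+1] > hBars[i] + 1:
--             h_best = fmax(h_best, hBars[i] + 1 - prev)
--             prev = hBars[i+1] - 1
--
--     # obtain max. w.r.t to last bar too
--     h_best = fmax(h_best, hBars[-1]+1-prev)
--
--     # do the same thing vertically
--     vBars.sort()
--     prev, v_best = vBars[0]-1, 0
--     for i in range(len(vBars)-1):
--         if vBars[i+1] > vBars[i] + 1:
--             v_best = fmax(v_best, vBars[i] + 1 - prev)
--             prev = vBars[i+1] - 1
--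
--     v_best = fmax(v_best, vBars[-1]+1-prev)
--
--     # max. square's side length is then constrained by min. of two best lengths
--     return pow(min(h_best, v_best), 2)
-- ===== SOURCE B (Python) =====
-- from typing import List
--
-- def maximizeSquareHoleArea(n: int, m: int, hBars: List[int], vBars: List[int]) -> int:
--     # Longest-consecutive-run via a hash set per direction (no sorting);
--     # side = min of the two longest runs + 1.
--
--     def longest_run(bars: List[int]) -> int:
--         s = set(bars)
--         best = 0
--         for x in s:
--             if x - 1 not in s:          # x starts a run
--                 y = x
--                 while y + 1 in s:
--                     y += 1
--                 if y - x + 1 > best: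
--                     best = y - x + 1
--         return best
--
--     return (min(longest_run(hBars), longest_run(vBars)) + 1) ** 2
-- ===== Notes on version B (the rewrite author's own statement) =====
-- stated objective: alternative
-- what changed: A sorts each bar list and scans adjacent pairs with a prev/best state machine; B builds a hash set per direction and counts each longest consecutive run from its run starts, with no sorting.
import Mathlib
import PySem

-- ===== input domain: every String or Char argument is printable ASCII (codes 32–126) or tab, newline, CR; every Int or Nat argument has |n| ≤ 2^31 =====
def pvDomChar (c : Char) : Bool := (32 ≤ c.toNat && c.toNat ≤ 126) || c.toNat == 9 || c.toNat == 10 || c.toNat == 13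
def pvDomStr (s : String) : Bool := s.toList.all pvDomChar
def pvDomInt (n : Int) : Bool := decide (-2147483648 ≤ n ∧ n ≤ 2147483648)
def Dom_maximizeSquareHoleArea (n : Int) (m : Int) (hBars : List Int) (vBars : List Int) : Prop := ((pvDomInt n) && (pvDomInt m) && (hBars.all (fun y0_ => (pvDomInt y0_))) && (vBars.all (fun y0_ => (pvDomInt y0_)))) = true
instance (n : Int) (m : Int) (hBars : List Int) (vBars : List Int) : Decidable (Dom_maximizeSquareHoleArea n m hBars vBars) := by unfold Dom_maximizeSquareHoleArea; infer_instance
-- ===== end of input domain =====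

-- B replaces A's sort-then-adjacent-scan by a hash-set longest-consecutive-run count per
-- direction (objective: alternative algorithm, no sorting). A sorts its two list arguments in
-- place; the equivalence proved here is about the RETURN value only (B does not mutate).

-- ===== PORT A =====
-- fmax = lambda a, b: a if a > b else b
def pvFmax (a b : Int) : Int := if a > b then a else b

def maximizeSquareHoleArea (n : Int) (m : Int) (hBars : List Int) (vBars : List Int) : Int :=
  -- hBars.sort(); prev, h_best = hBars[0]-1, 0; indexed loop over range(len(hBars)-1)
  let hs := PySem.List.sorted hBars (fun x => x) false
  let stH := (PySem.List.pyRange 0 ((hs.length : Int) - 1) 1).foldl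
    (fun (st : Int × Int) i =>
      if PySem.List.pyGetD hs (i + 1) 0 > PySem.List.pyGetD hs i 0 + 1 then
        (PySem.List.pyGetD hs (i + 1) 0 - 1, pvFmax st.2 (PySem.List.pyGetD hs i 0 + 1 - st.1))
      else st)
    (PySem.List.pyGetD hs 0 0 - 1, 0)
  let hBest := pvFmax stH.2 (PySem.List.pyGetD hs (-1) 0 + 1 - stH.1)
  -- same thing vertically
  let vs := PySem.List.sorted vBars (fun x => x) false
  let stV := (PySem.List.pyRange 0 ((vs.length : Int) - 1) 1).foldl
    (fun (st : Int × Int) i =>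
      if PySem.List.pyGetD vs (i + 1) 0 > PySem.List.pyGetD vs i 0 + 1 then
        (PySem.List.pyGetD vs (i + 1) 0 - 1, pvFmax st.2 (PySem.List.pyGetD vs i 0 + 1 - st.1))
      else st)
    (PySem.List.pyGetD vs 0 0 - 1, 0)
  let vBest := pvFmax stV.2 (PySem.List.pyGetD vs (-1) 0 + 1 - stV.1)
  (min hBest vBest) ^ 2

-- ===== PORT B =====
-- while y + 1 in s: y += 1   (fuel = |s| suffices: a run in s has at most |s| elements)
def pvClimb (s : List Int) : Nat → Int → Int
  | 0, y => y
  | fuel + 1, y => if (y + 1) ∈ s then pvClimb s fuel (y + 1) else y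

-- loop body of longest_run: contribution only when x starts a run
def pvF (s : List Int) (best x : Int) : Int :=
  if (x - 1) ∈ s then best
  else
    if pvClimb s s.length x - x + 1 > best then pvClimb s s.length x - x + 1 else best

def pvLongestRun (bars : List Int) : Int :=
  let s : PySem.Set Int := PySem.Set.ofList bars
  s.foldl (pvF s) 0

def maximizeSquareHoleArea_alt (n : Int) (m : Int) (hBars : List Int) (vBars : List Int) : Int :=
  (min (pvLongestRun hBars) (pvLongestRun vBars) + 1) ^ 2

-- ===== PRECONDITION & SPEC =====
-- Pre_ excludes exactly the inputs where A raises IndexError: an empty hBars or vBars.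
def Pre_maximizeSquareHoleArea (n : Int) (m : Int) (hBars : List Int) (vBars : List Int) : Prop :=
  hBars ≠ [] ∧ vBars ≠ []
instance (n : Int) (m : Int) (hBars : List Int) (vBars : List Int) : Decidable (Pre_maximizeSquareHoleArea n m hBars vBars) := by unfold Pre_maximizeSquareHoleArea; infer_instance

def pvWitness_maximizeSquareHoleArea : Int × Int × List Int × List Int := (3, 3, [1, 2], [1])

def Spec_maximizeSquareHoleArea (n : Int) (m : Int) (hBars : List Int) (vBars : List Int) (out : Int) : Prop := out = maximizeSquareHoleArea_alt n m hBars vBars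
instance (n : Int) (m : Int) (hBars : List Int) (vBars : List Int) (out : Int) : Decidable (Spec_maximizeSquareHoleArea n m hBars vBars out) := by unfold Spec_maximizeSquareHoleArea; infer_instance

-- ===== CLAIM (what is proved, stated in full; the proofs are below) =====
def Claim_equal_maximizeSquareHoleArea : Prop := ∀ (n : Int) (m : Int) (hBars : List Int) (vBars : List Int), Dom_maximizeSquareHoleArea n m hBars vBars → Pre_maximizeSquareHoleArea n m hBars vBars → Spec_maximizeSquareHoleArea n m hBars vBars (maximizeSquareHoleArea n m hBars vBars)


-- ===== LEMMAS AND PROOFS =====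

-- both programs' per-direction answer, as one structural recursion over the sorted list:
-- pvSpecS first cur rest = best "run value" (run length + 1), current run starting at `first`
def pvSpecS (first cur : Int) : List Int → Int
  | [] => cur - first + 2
  | y :: ys => if y > cur + 1 then max (cur - first + 2) (pvSpecS y y ys) else pvSpecS first y ys

-- adjacent dedup of a (sorted) list
def pvGo (c : Int) : List Int → List Int
  | [] => []
  | y :: ys => if y = c then pvGo c ys else y :: pvGo y ys

-- end of the consecutive run starting at c, read off a strictly sorted tail
def pvRunEnd (c : Int) : List Int → Int
  | [] => c
  | y :: ys => if y = c + 1 then pvRunEnd y ys else c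

lemma pvFmax_eq_max (a b : Int) : pvFmax a b = max a b := by
  unfold pvFmax; omega

-- A's adjacent-pair step
def pvStep (st : Int × Int) (p : Int × Int) : Int × Int :=
  if p.2 > p.1 + 1 then (p.2 - 1, pvFmax st.2 (p.1 + 1 - st.1)) else st

lemma pvRangeShiftAux (n : Nat) : ∀ a : Int,
    PySem.List.pyRange (a + 1) (a + 1 + n) 1 = (PySem.List.pyRange a (a + n) 1).map (· + 1) := by
  induction n with
  | zero => intro a; simp [PySem.List.pyRange_one_eq_nil]
  | succ k ih =>
    intro a
    have h1 : (a : Int) + 1 + (k + 1 : Nat) = (a + 1 + k) + 1 := by omega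
    have h2 : (a : Int) + (k + 1 : Nat) = (a + k) + 1 := by omega
    rw [h1, h2, PySem.List.pyRange_one_succ_right (by push_cast; omega),
        PySem.List.pyRange_one_succ_right (by push_cast; omega), List.map_append, ih a]
    simp
    omega

lemma pvRangeShift (b : Int) (hb : 0 ≤ b) :
    PySem.List.pyRange 1 (b + 1) 1 = (PySem.List.pyRange 0 b 1).map (· + 1) := by
  have := pvRangeShiftAux b.toNat 0
  rw [add_comm b 1]
  simpa [Int.toNat_of_nonneg hb] using this

lemma pvBridge (f : Int × Int → Int × Int → Int × Int) :
    ∀ (x : Int) (xs : List Int) (st : Int × Int),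
    (PySem.List.pyRange 0 (((x :: xs).length : Int) - 1) 1).foldl
      (fun st i => f st (PySem.List.pyGetD (x :: xs) i 0, PySem.List.pyGetD (x :: xs) (i + 1) 0)) st
    = ((x :: xs).zip xs).foldl f st := by
  intro x xs
  induction xs generalizing x with
  | nil => intro st; simp [PySem.List.pyRange_one_eq_nil]
  | cons y t ih =>
    intro st
    have hlen : (((x :: y :: t).length : Int) - 1) = (t.length : Int) + 1 := by
      push_cast [List.length_cons]; ring
    rw [hlen, PySem.List.pyRange_one_cons (by positivity)]
    have h0 : PySem.List.pyGetD (x :: y :: t) (0 : Int) 0 = x := by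
      simp [PySem.List.pyGetD_ofNat' (x :: y :: t) 0 0]
    have h1 : PySem.List.pyGetD (x :: y :: t) (1 : Int) 0 = y := by
      simpa using PySem.List.pyGetD_ofNat' (x :: y :: t) 1 0
    rw [List.foldl_cons]
    simp only [show (0 : Int) + 1 = (1 : Int) from rfl]
    rw [h0, h1]
    rw [pvRangeShift (t.length : Int) (by positivity), List.foldl_map]
    rw [PySem.List.foldl_congr_mem _ _
      (fun st i => f st (PySem.List.pyGetD (y :: t) i 0, PySem.List.pyGetD (y :: t) (i + 1) 0)) _
      (by
        intro acc i hi
        have hi0 : 0 ≤ i := (PySem.List.mem_pyRange_one.mp hi).1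
        obtain ⟨k, rfl⟩ := Int.eq_ofNat_of_zero_le hi0
        have e1 : PySem.List.pyGetD (x :: y :: t) ((k : Int) + 1) 0 = PySem.List.pyGetD (y :: t) (k : Int) 0 := by
          rw [show ((k : Int) + 1) = ((k + 1 : Nat) : Int) by push_cast; ring]
          rw [PySem.List.pyGetD_natCast, PySem.List.pyGetD_natCast]
          rfl
        have e2 : PySem.List.pyGetD (x :: y :: t) ((k : Int) + 1 + 1) 0 = PySem.List.pyGetD (y :: t) ((k : Int) + 1) 0 := by
          rw [show ((k : Int) + 1 + 1) = ((k + 2 : Nat) : Int) by push_cast; ring,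
              show ((k : Int) + 1) = ((k + 1 : Nat) : Int) by push_cast; ring]
          rw [PySem.List.pyGetD_natCast, PySem.List.pyGetD_natCast]
          rfl
        rw [e1, e2])]
    rw [show ((x :: y :: t).zip (y :: t)) = (x, y) :: ((y :: t).zip t) from rfl, List.foldl_cons]
    have := ih y (f st (x, y))
    rw [show (((y :: t).length : Int) - 1) = (t.length : Int) by push_cast [List.length_cons]; ring] at this
    exact this

-- A's tail: pair-fold then final fmax, characterized by pvSpecS
lemma pvAchar : ∀ (rest : List Int) (cur first best : Int),
    (let st := ((cur :: rest).zip rest).foldl pvStep (first - 1, best);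
     pvFmax st.2 (PySem.List.pyGetD (cur :: rest) (-1) 0 + 1 - st.1))
    = max best (pvSpecS first cur rest) := by
  intro rest
  induction rest with
  | nil =>
    intro cur first best
    simp [pvSpecS, pvFmax_eq_max, PySem.List.pyGetD, PySem.List.pyGet?, PySem.List.pyIdx?]
    omega
  | cons y ys ih =>
    intro cur first best
    have hlast : PySem.List.pyGetD (cur :: y :: ys) (-1) 0 = PySem.List.pyGetD (y :: ys) (-1) 0 := by
      simp [PySem.List.pyGetD, PySem.List.pyGet?, PySem.List.pyIdx?]
      omega
    show (let st := List.foldl pvStep (pvStep (first - 1, best) (cur, y)) ((y :: ys).zip ys);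
          pvFmax st.2 (PySem.List.pyGetD (cur :: y :: ys) (-1) 0 + 1 - st.1))
        = max best (pvSpecS first cur (y :: ys))
    by_cases hgap : y > cur + 1
    · have hstep : pvStep (first - 1, best) (cur, y) = (y - 1, max best (cur - first + 2)) := by
        simp [pvStep, hgap, pvFmax_eq_max, Prod.ext_iff]
        omega
      rw [hstep]
      simp only [hlast]
      calc _ = max (max best (cur - first + 2)) (pvSpecS y y ys) := by
              have h2 := ih y y (max best (cur - first + 2))
              simpa [hlast] using h2
        _ = max best (pvSpecS first cur (y :: ys)) := by
              simp only [pvSpecS, if_pos hgap]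
              omega
    · have hstep : pvStep (first - 1, best) (cur, y) = (first - 1, best) := by
        simp [pvStep, hgap]
      rw [hstep]
      simp only [hlast]
      calc _ = max best (pvSpecS first y ys) := ih y first best
        _ = max best (pvSpecS first cur (y :: ys)) := by simp [pvSpecS, hgap]

lemma pvGo_cons_self (c : Int) (ys : List Int) : pvGo c (c :: ys) = pvGo c ys := by
  simp [pvGo]

lemma pvGo_cons_ne (c y : Int) (ys : List Int) (h : y ≠ c) : pvGo c (y :: ys) = y :: pvGo y ys := by
  simp [pvGo, h]

-- pvSpecS ignores duplicates in a ≤-sorted tail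
lemma pvSpecS_go : ∀ (rest : List Int) (cur first : Int),
    List.Pairwise (· ≤ ·) (cur :: rest) →
    pvSpecS first cur rest = pvSpecS first cur (pvGo cur rest) := by
  intro rest
  induction rest with
  | nil => intro cur first _; simp [pvGo]
  | cons y ys ih =>
    intro cur first hp
    have hcy : cur ≤ y := (List.pairwise_cons.mp hp).1 y (by simp)
    have hpy : List.Pairwise (· ≤ ·) (y :: ys) := (List.pairwise_cons.mp hp).2
    by_cases hdup : y = cur
    · subst hdup
      have hny : ¬ (y > y + 1) := by omega
      simp only [pvGo_cons_self, pvSpecS, if_neg hny]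
      exact ih y first hpy
    · simp only [pvGo_cons_ne cur y ys hdup, pvSpecS]
      by_cases hgap : y > cur + 1
      · simp only [if_pos hgap]
        rw [ih y y hpy]
      · simp only [if_neg hgap]
        rw [ih y first hpy]

lemma pvGo_mem : ∀ (rest : List Int) (cur z : Int),
    (z ∈ cur :: pvGo cur rest ↔ z ∈ cur :: rest) := by
  intro rest
  induction rest with
  | nil => intro cur z; simp [pvGo]
  | cons y ys ih =>
    intro cur z
    by_cases hdup : y = cur
    · subst hdup
      simp only [pvGo_cons_self]
      rw [ih y z]
      simp
    · simp only [pvGo_cons_ne cur y ys hdup]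
      constructor
      · intro h
        rcases List.mem_cons.mp h with h | h
        · simp [h]
        · have := (ih y z).mp (by simpa using h)
          rcases List.mem_cons.mp this with h | h <;> simp [h]
      · intro h
        rcases List.mem_cons.mp h with h | h
        · simp [h]
        · rcases List.mem_cons.mp h with h | h
          · have : z ∈ y :: pvGo y ys := (ih y z).mpr (by simp [h])
            simpa using List.mem_cons_of_mem cur this
          · have : z ∈ y :: pvGo y ys := (ih y z).mpr (by simp [h])
            simpa using List.mem_cons_of_mem cur this

lemma pvGo_pairwise : ∀ (rest : List Int) (cur : Int),
    List.Pairwise (· ≤ ·) (cur :: rest) →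
    List.Pairwise (· < ·) (cur :: pvGo cur rest) := by
  intro rest
  induction rest with
  | nil => intro cur _; simp [pvGo]
  | cons y ys ih =>
    intro cur hp
    have hcy : cur ≤ y := (List.pairwise_cons.mp hp).1 y (by simp)
    have hpy : List.Pairwise (· ≤ ·) (y :: ys) := (List.pairwise_cons.mp hp).2
    by_cases hdup : y = cur
    · subst hdup
      simp only [pvGo_cons_self]
      exact ih y hpy
    · have hlt : cur < y := lt_of_le_of_ne hcy (Ne.symm hdup)
      simp only [pvGo_cons_ne cur y ys hdup]
      have hy := ih y hpy
      refine List.pairwise_cons.mpr ⟨?_, hy⟩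
      intro z hz
      rcases List.mem_cons.mp hz with h | h
      · omega
      · have : y < z := (List.pairwise_cons.mp hy).1 z h
        omega

lemma pvClimb_spec (s : List Int) : ∀ (fuel : Nat) (cur E : Int),
    cur ≤ E → (∀ j, cur < j → j ≤ E → j ∈ s) → (E + 1) ∉ s → (E - cur).toNat ≤ fuel →
    pvClimb s fuel cur = E := by
  intro fuel
  induction fuel with
  | zero =>
    intro cur E h1 _ _ h4
    have : E = cur := by omega
    simp [pvClimb, this]
  | succ k ih =>
    intro cur E h1 h2 h3 h4
    by_cases heq : cur = E
    · subst heq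
      simp [pvClimb, h3]
    · have hlt : cur < E := lt_of_le_of_ne h1 heq
      have hmem : (cur + 1) ∈ s := h2 (cur + 1) (by omega) (by omega)
      simp only [pvClimb, if_pos hmem]
      exact ih (cur + 1) E (by omega) (fun j hj1 hj2 => h2 j (by omega) hj2) h3 (by omega)

lemma pvRunEnd_ge : ∀ (rest : List Int) (c : Int), c ≤ pvRunEnd c rest := by
  intro rest
  induction rest with
  | nil => intro c; simp [pvRunEnd]
  | cons y ys ih =>
    intro c
    simp only [pvRunEnd]
    split_ifs with h
    · have := ih y; omega
    · omega

lemma pvRunEnd_mem : ∀ (rest : List Int) (c j : Int),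
    c < j → j ≤ pvRunEnd c rest → j ∈ c :: rest := by
  intro rest
  induction rest with
  | nil => intro c j h1 h2; simp [pvRunEnd] at h2; omega
  | cons y ys ih =>
    intro c j h1 h2
    simp only [pvRunEnd] at h2
    split_ifs at h2 with h
    · by_cases hj : j = y
      · simp [hj]
      · have : j ∈ y :: ys := ih y j (by omega) h2
        simpa using Or.inr (by simpa using this)
    · omega

lemma pvRunEnd_le_len : ∀ (rest : List Int) (c : Int),
    pvRunEnd c rest ≤ c + rest.length := by
  intro rest
  induction rest with
  | nil => intro c; simp [pvRunEnd]
  | cons y ys ih =>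
    intro c
    simp only [pvRunEnd]
    split_ifs with h
    · have := ih y; simp; omega
    · simp; omega

lemma pvRunEnd_succ_not_mem_suffix : ∀ (rest : List Int) (c : Int),
    List.Pairwise (· < ·) (c :: rest) →
    ∀ z ∈ c :: rest, z ≠ pvRunEnd c rest + 1 := by
  intro rest
  induction rest with
  | nil => intro c _ z hz; simp at hz; simp [pvRunEnd, hz]
  | cons y ys ih =>
    intro c hp z hz
    have hcy : c < y := (List.pairwise_cons.mp hp).1 y (by simp)
    have hpy : List.Pairwise (· < ·) (y :: ys) := (List.pairwise_cons.mp hp).2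
    simp only [pvRunEnd]
    split_ifs with h
    · rcases List.mem_cons.mp hz with hzc | hzt
      · have hge := pvRunEnd_ge ys y
        omega
      · exact ih y hpy z hzt
    · have hy2 : y > c + 1 := by omega
      rcases List.mem_cons.mp hz with hzc | hzt
      · omega
      · have : y ≤ z := by
          rcases List.mem_cons.mp hzt with h' | h'
          · omega
          · have := (List.pairwise_cons.mp hpy).1 z h'; omega
        omega

lemma pvRunEnd_succ_not_mem (pre rest : List Int) (c : Int)
    (hp : List.Pairwise (· < ·) (pre ++ c :: rest)) :
    pvRunEnd c rest + 1 ∉ pre ++ c :: rest := by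
  intro hmem
  obtain ⟨_, hsuf, hcross⟩ := List.pairwise_append.mp hp
  rcases List.mem_append.mp hmem with h | h
  · have h1 := hcross _ h c (by simp)
    have h2 := pvRunEnd_ge rest c
    omega
  · exact pvRunEnd_succ_not_mem_suffix rest c hsuf _ h rfl

lemma pvSpecS_ge : ∀ (rest : List Int) (cur first : Int),
    List.Pairwise (· < ·) (cur :: rest) →
    pvRunEnd cur rest - first + 2 ≤ pvSpecS first cur rest := by
  intro rest
  induction rest with
  | nil => intro cur first _; simp [pvRunEnd, pvSpecS]
  | cons y ys ih =>
    intro cur first hp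
    have hcy : cur < y := (List.pairwise_cons.mp hp).1 y (by simp)
    have hpy : List.Pairwise (· < ·) (y :: ys) := (List.pairwise_cons.mp hp).2
    simp only [pvRunEnd, pvSpecS]
    by_cases h : y = cur + 1
    · have hng : ¬ (y > cur + 1) := by omega
      simp only [if_pos h, if_neg hng]
      exact ih y first hpy
    · have hg : y > cur + 1 := by omega
      simp only [if_neg h, if_pos hg]
      omega

lemma pvF_eq_max (s : List Int) (b x : Int) :
    pvF s b x = if (x - 1) ∈ s then b else max b (pvClimb s s.length x - x + 1) := by
  unfold pvF
  split_ifs <;> omega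

-- the central loop invariant: folding pvF over a strictly sorted suffix starting inside
-- a run beginning at `first`
lemma pvUni : ∀ (rest pre : List Int) (cur first b : Int) (ds : List Int),
    ds = pre ++ cur :: rest → List.Pairwise (· < ·) ds →
    first ≤ cur → (∀ j, first ≤ j → j ≤ cur → j ∈ ds) → (first - 1) ∉ ds →
    (first = cur ∨ pvRunEnd cur rest - first + 1 ≤ b) →
    (cur :: rest).foldl (pvF ds) b = max b (pvSpecS first cur rest - 1) := by
  intro rest
  induction rest with
  | nil =>
    intro pre cur first b ds hds hp hfc hint hnm hstart
    have hclimb : pvClimb ds ds.length cur = cur := by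
      apply pvClimb_spec ds ds.length cur cur le_rfl (by intro j h1 h2; omega)
      · have := pvRunEnd_succ_not_mem pre [] cur (hds ▸ hp)
        simpa [pvRunEnd, hds] using this
      · simp
    simp only [List.foldl_cons, List.foldl_nil, pvF_eq_max, pvSpecS]
    simp only [pvRunEnd] at hstart
    by_cases hm : (cur - 1) ∈ ds
    · rw [if_pos hm]
      have hflt : first < cur := by
        rcases eq_or_lt_of_le hfc with h | h
        · exact absurd (h ▸ hm) hnm
        · exact h
      rcases hstart with h | h <;> omega
    · rw [if_neg hm, hclimb]
      have hfe : first = cur := by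
        by_contra hne
        exact hm (hint (cur - 1) (by omega) (by omega))
      omega
  | cons y ys ih =>
    intro pre cur first b ds hds hp hfc hint hnm hstart
    obtain ⟨hppre, hsuf, hcross⟩ := List.pairwise_append.mp (hds ▸ hp)
    have hcy : cur < y := (List.pairwise_cons.mp hsuf).1 y (by simp)
    have hpy : List.Pairwise (· < ·) (y :: ys) := (List.pairwise_cons.mp hsuf).2
    have hdsy : ds = (pre ++ [cur]) ++ y :: ys := by simp [hds]
    have hymem : y ∈ ds := by simp [hds]
    have hE1 : pvRunEnd cur (y :: ys) + 1 ∉ ds := hds ▸ pvRunEnd_succ_not_mem pre (y :: ys) cur (hds ▸ hp)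
    set E := pvRunEnd cur (y :: ys) with hEdef
    have hEc : cur ≤ E := pvRunEnd_ge (y :: ys) cur
    have hclimb : pvClimb ds ds.length cur = E := by
      apply pvClimb_spec ds ds.length cur E hEc
      · intro j h1 h2
        have := pvRunEnd_mem (y :: ys) cur j h1 h2
        rw [hds]; exact List.mem_append_right _ this
      · exact hE1
      · have h1 := pvRunEnd_le_len (y :: ys) cur
        have h2 : (y :: ys).length ≤ ds.length := by
          rw [hds]; simp; omega
        omega
    -- value of the first fold step
    have hstep : pvF ds b cur = (if first = cur then max b (E - cur + 1) else b) := by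
      rw [pvF_eq_max]
      split_ifs with hm hfe hfe
      · exfalso
        rcases hstart with heq | _
        · exact hnm (heq ▸ hm)
        · -- first < cur is fine: cur - 1 ∈ ds is expected; but then branch gives b
          exact absurd hm (by rw [hfe] at hnm; exact hnm)
      · rfl
      · rw [hclimb]
      · exfalso
        have : first < cur := lt_of_le_of_ne hfc hfe
        exact hm (hint (cur - 1) (by omega) (by omega))
    by_cases hrun : y = cur + 1
    · -- run continues
      have hEy : E = pvRunEnd y ys := by simp [hEdef, pvRunEnd, hrun]
      have hb' : pvRunEnd y ys - first + 1 ≤ pvF ds b cur := by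
        rw [hstep]
        split_ifs with hfe
        · subst hfe; omega
        · rcases hstart with heq | hb
          · exact absurd heq hfe
          · simp only [hEdef, pvRunEnd, if_pos hrun] at hb
            omega
      have hres := ih (pre ++ [cur]) y first (pvF ds b cur) ds hdsy hp (by omega)
        (by
          intro j h1 h2
          by_cases hj : j = y
          · exact hj ▸ hymem
          · exact hint j h1 (by omega))
        hnm (Or.inr hb')
      rw [List.foldl_cons, hres]
      have hgap : ¬ (y > cur + 1) := by omega
      have hSa : pvSpecS first cur (y :: ys) = pvSpecS first y ys := by
        simp [pvSpecS, hgap]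
      rw [hSa, hstep]
      split_ifs with hfe
      · have hge := pvSpecS_ge ys y first hpy
        rw [← hEy] at hge
        subst hfe
        omega
      · rfl
    · -- new run starts at y
      have hgap : y > cur + 1 := by omega
      have hEcur : E = cur := by simp [hEdef, pvRunEnd, hrun]
      have hynm : (y - 1) ∉ ds := by
        intro hm
        rw [hds] at hm
        rcases List.mem_append.mp hm with h | h
        · have := hcross _ h cur (by simp); omega
        · rcases List.mem_cons.mp h with h' | h'
          · omega
          · rcases List.mem_cons.mp h' with h'' | h''
            · omega
            · have := (List.pairwise_cons.mp hpy).1 _ h''; omega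
      have hres := ih (pre ++ [cur]) y y (pvF ds b cur) ds hdsy hp le_rfl
        (by intro j h1 h2; have : j = y := by omega
            exact this ▸ hymem)
        hynm (Or.inl rfl)
      rw [List.foldl_cons, hres]
      have hSa : pvSpecS first cur (y :: ys) = max (cur - first + 2) (pvSpecS y y ys) := by
        simp [pvSpecS, hgap]
      rw [hSa, hstep]
      have hge := pvSpecS_ge ys y y hpy
      have hgy := pvRunEnd_ge ys y
      split_ifs with hfe
      · subst hfe; omega
      · rcases hstart with heq | hb
        · exact absurd heq hfe
        · rw [hEcur] at hb
          omega

lemma pvClimb_congr (s t : List Int) (hmem : ∀ a, a ∈ s ↔ a ∈ t) :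
    ∀ (fuel : Nat) (y : Int), pvClimb s fuel y = pvClimb t fuel y := by
  intro fuel
  induction fuel with
  | zero => intro y; simp [pvClimb]
  | succ k ih =>
    intro y
    simp only [pvClimb, hmem]
    split_ifs with h
    · exact ih (y + 1)
    · rfl

lemma pvF_congr (s t : List Int) (hmem : ∀ a, a ∈ s ↔ a ∈ t) (hlen : s.length = t.length) :
    pvF s = pvF t := by
  funext b x
  simp only [pvF, hmem, hlen, pvClimb_congr s t hmem]

-- per-direction equality: B's longest run is pvSpecS - 1
lemma pvLongestRun_eq (bars : List Int) (d0 : Int) (tl : List Int)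
    (hsort : PySem.List.sorted bars (fun x => x) false = d0 :: tl) :
    pvLongestRun bars = pvSpecS d0 d0 tl - 1 := by
  have hpw : List.Pairwise (· ≤ ·) (d0 :: tl) := by
    have := PySem.List.sorted_pairwise bars (fun x => x)
    rw [hsort] at this
    exact this
  set ds : List Int := d0 :: pvGo d0 tl with hdsdef
  have hdp : List.Pairwise (· < ·) ds := pvGo_pairwise tl d0 hpw
  have hdnd : ds.Nodup := hdp.imp (fun h => ne_of_lt h)
  have hmemds : ∀ z, z ∈ ds ↔ z ∈ bars := by
    intro z
    rw [hdsdef]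
    rw [pvGo_mem tl d0 z, ← hsort, PySem.List.mem_sorted]
  set s : PySem.Set Int := PySem.Set.ofList bars with hsdef
  have hsnd : s.Nodup := PySem.Set.nodup_ofList bars
  have hmemiff : ∀ a, a ∈ s ↔ a ∈ ds := by
    intro a
    rw [hsdef, PySem.Set.mem_ofList, hmemds]
  have hperm : s.Perm ds := (List.perm_ext_iff_of_nodup hsnd hdnd).mpr hmemiff
  have hlen : s.length = ds.length := hperm.length_eq
  have hrc : RightCommutative (pvF s) := by
    constructor
    intro b x y
    simp only [pvF_eq_max]
    split_ifs <;> omega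
  have h1 : pvLongestRun bars = ds.foldl (pvF s) 0 := by
    unfold pvLongestRun
    exact hperm.foldl_eq 0
  rw [h1, pvF_congr s ds hmemiff hlen]
  have hd0nm : (d0 - 1) ∉ ds := by
    intro hm
    rcases List.mem_cons.mp hm with h | h
    · omega
    · have := (List.pairwise_cons.mp hdp).1 _ h; omega
  have := pvUni (pvGo d0 tl) [] d0 d0 0 ds (by simp [hdsdef]) hdp le_rfl
    (by intro j h1 h2
        have : j = d0 := by omega
        simp [this, hdsdef])
    hd0nm (Or.inl rfl)
  rw [hdsdef] at this ⊢
  rw [this]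
  have hsge := pvSpecS_ge (pvGo d0 tl) d0 d0 hdp
  have hrge := pvRunEnd_ge (pvGo d0 tl) d0
  rw [← pvSpecS_go tl d0 d0 hpw] at hsge ⊢
  omega

-- per-direction equality: A's scan equals pvSpecS
lemma pvDirA_eq (bars : List Int) (hne : bars ≠ []) :
    (let hs := PySem.List.sorted bars (fun x => x) false
     let st := (PySem.List.pyRange 0 ((hs.length : Int) - 1) 1).foldl
       (fun (st : Int × Int) i =>
         if PySem.List.pyGetD hs (i + 1) 0 > PySem.List.pyGetD hs i 0 + 1 then
           (PySem.List.pyGetD hs (i + 1) 0 - 1, pvFmax st.2 (PySem.List.pyGetD hs i 0 + 1 - st.1))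
         else st)
       (PySem.List.pyGetD hs 0 0 - 1, 0)
     pvFmax st.2 (PySem.List.pyGetD hs (-1) 0 + 1 - st.1))
    = pvLongestRun bars + 1 := by
  obtain ⟨d0, tl, hsort⟩ : ∃ d0 tl, PySem.List.sorted bars (fun x => x) false = d0 :: tl := by
    rcases h : PySem.List.sorted bars (fun x => x) false with _ | ⟨d0, tl⟩
    · exact absurd ((PySem.List.sorted_eq_nil_iff bars _ false).mp h) hne
    · exact ⟨d0, tl, rfl⟩
  simp only [hsort]
  have h0 : PySem.List.pyGetD (d0 :: tl) (0 : Int) 0 = d0 := by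
    simp [PySem.List.pyGetD_ofNat' (d0 :: tl) 0 0]
  rw [h0]
  have hb := pvBridge pvStep d0 tl (d0 - 1, 0)
  rw [show (fun (st : Int × Int) i =>
         if PySem.List.pyGetD (d0 :: tl) (i + 1) 0 > PySem.List.pyGetD (d0 :: tl) i 0 + 1 then
           (PySem.List.pyGetD (d0 :: tl) (i + 1) 0 - 1, pvFmax st.2 (PySem.List.pyGetD (d0 :: tl) i 0 + 1 - st.1))
         else st)
      = (fun (st : Int × Int) i => pvStep st (PySem.List.pyGetD (d0 :: tl) i 0, PySem.List.pyGetD (d0 :: tl) (i + 1) 0)) from rfl]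
  rw [hb]
  have := pvAchar tl d0 d0 0
  simp only at this
  rw [this]
  rw [pvLongestRun_eq bars d0 tl hsort]
  have hpw : List.Pairwise (· ≤ ·) (d0 :: tl) := by
    have := PySem.List.sorted_pairwise bars (fun x => x)
    rw [hsort] at this
    exact this
  have hdp : List.Pairwise (· < ·) (d0 :: pvGo d0 tl) := pvGo_pairwise tl d0 hpw
  have hsge := pvSpecS_ge (pvGo d0 tl) d0 d0 hdp
  have hrge := pvRunEnd_ge (pvGo d0 tl) d0
  rw [← pvSpecS_go tl d0 d0 hpw] at hsge
  omega

-- ===== VERDICT (by name: the statement is the Claim_ definition above) =====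
theorem maximizeSquareHoleArea_spec : Claim_equal_maximizeSquareHoleArea := by
  intro n m hBars vBars _ hpre
  obtain ⟨hH, hV⟩ := hpre
  show maximizeSquareHoleArea n m hBars vBars = maximizeSquareHoleArea_alt n m hBars vBars
  have hh := pvDirA_eq hBars hH
  have hv := pvDirA_eq vBars hV
  simp only [] at hh hv
  unfold maximizeSquareHoleArea maximizeSquareHoleArea_alt
  simp only []
  rw [hh, hv]
  have : min (pvLongestRun hBars + 1) (pvLongestRun vBars + 1)
       = min (pvLongestRun hBars) (pvLongestRun vBars) + 1 := by omega
  rw [this]
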